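-- pv_equiv track=rewrite | github.com/vigneshsabapathi/python-algorithms | bit_manipulation/binary_and_operator_optimized.py | binary_and_bitshift
-- ===== SOURCE A (Python) =====
-- def binary_and_bitshift(a: int, b: int) -> str:
--     """
--     Binary AND built bit-by-bit using right-shifts and & 1.
--
--     Demonstrates the underlying mechanics clearly — useful in interviews
--     when asked to implement bitwise operations from scratch.
--
--     >>> binary_and_bitshift(25, 32)
--     '0b000000'
--     >>> binary_and_bitshift(37, 50)
--     '0b100000'
--     >>> binary_and_bitshift(21, 30)
--     '0b10100'
--     >>> binary_and_bitshift(58, 73)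
--     '0b0001000'
--     >>> binary_and_bitshift(0, 255)
--     '0b00000000'
--     >>> binary_and_bitshift(256, 256)
--     '0b100000000'
--     >>> binary_and_bitshift(0, -1)
--     Traceback (most recent call last):
--         ...
--     ValueError: the value of both inputs must be positive
--     """
--     if a < 0 or b < 0:
--         raise ValueError("the value of both inputs must be positive")
--
--     max_len = max(a.bit_length(), b.bit_length(), 1)
--     bits = []
--     for i in range(max_len - 1, -1, -1):
--         bit_a = (a >> i) & 1
--         bit_b = (b >> i) & 1
--         bits.append(str(bit_a & bit_b))
--     return "0b" + "".join(bits)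
-- ===== SOURCE B (Python) =====
-- def binary_and_bitshift(a: int, b: int) -> str:
--     if a < 0 or b < 0:
--         raise ValueError("the value of both inputs must be positive")
--     max_len = max(a.bit_length(), b.bit_length(), 1)
--     return "0b" + format(a & b, "0" + str(max_len) + "b")
-- ===== Notes on version B (the rewrite author's own statement) =====
-- stated objective: simpler
-- what changed: Replaces the per-bit loop of shifts and masks with a single machine-level AND (a & b) formatted once via a zero-padded format spec; no loop over bit positions remains.
import Mathlib
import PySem

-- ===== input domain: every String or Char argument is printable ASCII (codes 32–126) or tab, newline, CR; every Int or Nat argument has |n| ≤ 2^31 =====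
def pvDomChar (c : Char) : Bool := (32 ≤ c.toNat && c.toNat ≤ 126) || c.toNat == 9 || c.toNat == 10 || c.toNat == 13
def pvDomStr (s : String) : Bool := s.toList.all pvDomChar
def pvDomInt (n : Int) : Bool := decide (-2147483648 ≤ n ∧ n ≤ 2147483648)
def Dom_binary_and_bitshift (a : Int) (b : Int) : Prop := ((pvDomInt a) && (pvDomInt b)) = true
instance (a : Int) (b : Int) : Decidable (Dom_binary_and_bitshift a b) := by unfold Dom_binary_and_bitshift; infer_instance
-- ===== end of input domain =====

-- B replaces A's per-bit loop of shifts/masks by one whole-number AND plus zero-padded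
-- binary formatting (objective: simpler). Equivalence is about the return value.

-- ===== PORT A =====
-- literal port of A's bit-by-bit loop: i runs over range(max_len-1, -1, -1),
-- each step appends str((a>>i & 1) & (b>>i & 1)); i ≥ 0 on every iteration, so
-- i.toNat is exact here.
def binary_and_bitshift (a : Int) (b : Int) : String :=
  if a < 0 ∨ b < 0 then ""  -- Python raises ValueError here; excluded by Pre_
  else
    let maxLen : Nat := max (max (PySem.Int.bitLength a) (PySem.Int.bitLength b)) 1
    let bits : List String :=
      (PySem.List.pyRange ((maxLen : Int) - 1) (-1) (-1)).foldl
        (fun acc i =>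
          let bit_a := PySem.Int.band (a >>> i.toNat) 1
          let bit_b := PySem.Int.band (b >>> i.toNat) 1
          acc ++ [PySem.Int.toStr (PySem.Int.band bit_a bit_b)]) []
    "0b" ++ PySem.Str.join "" bits

-- ===== PORT B =====
-- binary digits of n (most significant first), empty for 0 — the digit list
-- format(n, "b") produces before padding; fuel-structured so the kernel can
-- evaluate it (fuel ≥ n always suffices since n/2 < n for n ≥ 1)
def pvBinAux : Nat → Nat → List Char
  | _, 0 => []
  | 0, _ + 1 => []
  | fuel + 1, n + 1 => pvBinAux fuel ((n + 1) / 2) ++ [if (n + 1) % 2 = 1 then '1' else '0']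

def pvBinDigits (n : Nat) : List Char := pvBinAux n n

-- format(r, "0" + str(w) + "b"): minimal binary representation, left-padded with '0' to width w
def pvFormatBin (r w : Nat) : List Char :=
  let s := if r = 0 then ['0'] else pvBinDigits r
  List.replicate (w - s.length) '0' ++ s

def binary_and_bitshift_alt (a : Int) (b : Int) : String :=
  if a < 0 ∨ b < 0 then ""  -- same guard as A: Python B raises ValueError here
  else
    let maxLen : Nat := max (max (PySem.Int.bitLength a) (PySem.Int.bitLength b)) 1
    "0b" ++ String.ofList (pvFormatBin (PySem.Int.band a b).toNat maxLen)

-- ===== PRECONDITION & SPEC =====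
-- Pre_ excludes exactly the inputs with a negative argument, where the Python A raises ValueError.
def Pre_binary_and_bitshift (a : Int) (b : Int) : Prop := 0 ≤ a ∧ 0 ≤ b
instance (a : Int) (b : Int) : Decidable (Pre_binary_and_bitshift a b) := by
  unfold Pre_binary_and_bitshift; infer_instance

def pvWitness_binary_and_bitshift : Int × Int := (37, 50)

def Spec_binary_and_bitshift (a : Int) (b : Int) (out : String) : Prop := out = binary_and_bitshift_alt a b
instance (a : Int) (b : Int) (out : String) : Decidable (Spec_binary_and_bitshift a b out) := by
  unfold Spec_binary_and_bitshift; infer_instance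

-- ===== CLAIM (what is proved, stated in full; the proofs are below) =====
def Claim_equal_binary_and_bitshift : Prop := ∀ (a : Int) (b : Int), Dom_binary_and_bitshift a b → Pre_binary_and_bitshift a b → Spec_binary_and_bitshift a b (binary_and_bitshift a b)

-- ===== LEMMAS AND PROOFS =====

-- the character emitted for bit i
def pvBitChar (r i : Nat) : Char := if r.testBit i then '1' else '0'

-- folding with `acc ++ [f i]` is mapping
theorem pv_foldl_append {α β : Type} (f : α → β) :
    ∀ (l : List α) (init : List β),
      l.foldl (fun acc i => acc ++ [f i]) init = init ++ l.map f := by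
  intro l
  induction l with
  | nil => intro init; simp
  | cons x xs ih => intro init; simp [List.foldl, ih]

-- the fuel argument is irrelevant as long as it is large enough
theorem pvBinAux_fuel : ∀ (f f' n : Nat), n ≤ f → n ≤ f' → pvBinAux f n = pvBinAux f' n := by
  intro f
  induction f with
  | zero =>
    intro f' n hf _
    interval_cases n
    cases f' <;> rfl
  | succ f ih =>
    intro f' n hf hf'
    match n, f' with
    | 0, f' => cases f' <;> rfl
    | n + 1, 0 => omega
    | n + 1, f' + 1 =>
      show pvBinAux f ((n + 1) / 2) ++ _ = pvBinAux f' ((n + 1) / 2) ++ _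
      rw [ih f' ((n + 1) / 2) (by omega) (by omega)]

theorem pvBinDigits_pos (r : Nat) (h : 1 ≤ r) :
    pvBinDigits r = pvBinDigits (r / 2) ++ [if r % 2 = 1 then '1' else '0'] := by
  obtain ⟨m, rfl⟩ := Nat.exists_eq_add_of_le h
  show pvBinAux (1 + m) (1 + m) = _
  rw [show 1 + m = m + 1 by omega]
  show pvBinAux m ((m + 1) / 2) ++ _ = pvBinAux ((m + 1) / 2) ((m + 1) / 2) ++ _
  rw [pvBinAux_fuel m ((m + 1) / 2) ((m + 1) / 2) (by omega) (by omega)]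

theorem pvBinDigits_one : pvBinDigits 1 = ['1'] := by decide

-- padding step: low-bit recursion of the padded representation
theorem pvFormatBin_succ (r w : Nat) (hw : 1 ≤ w) :
    pvFormatBin r (w + 1) = pvFormatBin (r / 2) w ++ [pvBitChar r 0] := by
  have hbit : pvBitChar r 0 = (if r % 2 = 1 then '1' else '0') := by
    simp [pvBitChar, Nat.testBit_zero]
  have hrep : List.replicate w '0' = List.replicate (w - 1) '0' ++ ['0'] := by
    rw [show w = (w - 1) + 1 by omega]
    exact List.replicate_succ' ..
  rcases Nat.lt_or_ge r 2 with hr | hr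
  · interval_cases r
    · simp [pvFormatBin, hbit, hrep]
    · simp [pvFormatBin, pvBinDigits_one, hbit, hrep]
  · have h2 : r ≠ 0 := by omega
    have h3 : r / 2 ≠ 0 := by omega
    rw [pvFormatBin, pvFormatBin, pvBinDigits_pos r (by omega)]
    simp only [h2, h3, if_false, List.length_append, List.length_singleton]
    rw [show w + 1 - ((pvBinDigits (r / 2)).length + 1) = w - (pvBinDigits (r / 2)).length by omega]
    simp [hbit]

-- the descending bit-character list peels its low bit
theorem pvDesc_succ (r w : Nat) :
    (List.range (w + 1)).map (fun k => pvBitChar r (w - k)) =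
      (List.range w).map (fun k => pvBitChar (r / 2) (w - 1 - k)) ++ [pvBitChar r 0] := by
  rw [List.range_succ, List.map_append]
  congr 1
  · apply List.map_congr_left
    intro k hk
    have hk' : k < w := List.mem_range.mp hk
    have : w - k = (w - 1 - k) + 1 := by omega
    rw [this]
    simp [pvBitChar, Nat.testBit_add_one]
  · simp

-- core: the descending bit characters ARE the zero-padded binary representation
theorem pv_core (w : Nat) : ∀ r : Nat, 1 ≤ w + 1 → r < 2 ^ (w + 1) →
    (List.range (w + 1)).map (fun k => pvBitChar r (w - k)) = pvFormatBin r (w + 1) := by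
  induction w with
  | zero =>
    intro r _ hr
    interval_cases r <;> decide
  | succ w ih =>
    intro r _ hr
    have hr2 : r / 2 < 2 ^ (w + 1) := by
      have : 2 ^ (w + 1 + 1) = 2 ^ (w + 1) * 2 := by ring
      omega
    rw [pvDesc_succ r (w + 1)]
    simp only [Nat.add_sub_cancel]
    rw [ih (r / 2) (by omega) hr2, pvFormatBin_succ r (w + 1) (by omega)]

-- pv_core restated with the subtraction pattern the final goal carries
theorem pv_core' (w r : Nat) (hw : 1 ≤ w) (hr : r < 2 ^ w) :
    (List.range w).map (fun k => pvBitChar r (w - 1 - k)) = pvFormatBin r w := by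
  obtain ⟨w', rfl⟩ : ∃ w', w = w' + 1 := ⟨w - 1, by omega⟩
  simp only [Nat.add_sub_cancel]
  exact pv_core w' r (by omega) hr

-- each loop step's string is the singleton of the bit character
theorem pv_step (na nb i : Nat) :
    PySem.Int.toStr
        (PySem.Int.band (PySem.Int.band ((na : Int) >>> (i : Int)) 1)
          (PySem.Int.band ((nb : Int) >>> (i : Int)) 1)) =
      String.ofList [pvBitChar (na &&& nb) i] := by
  have ha : ((na : Int) >>> (i : Int)) = ((na >>> i : Nat) : Int) :=
    Int.shiftRight_natCast na i
  have hb : ((nb : Int) >>> (i : Int)) = ((nb >>> i : Nat) : Int) :=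
    Int.shiftRight_natCast nb i
  rw [ha, hb]
  have h1 : PySem.Int.band ((na >>> i : Nat) : Int) 1 = (((na >>> i) &&& 1 : Nat) : Int) := by
    exact_mod_cast PySem.Int.band_natCast (na >>> i) 1
  have h2 : PySem.Int.band ((nb >>> i : Nat) : Int) 1 = (((nb >>> i) &&& 1 : Nat) : Int) := by
    exact_mod_cast PySem.Int.band_natCast (nb >>> i) 1
  rw [h1, h2, PySem.Int.band_natCast]
  have hbit : ((na >>> i) &&& 1) &&& ((nb >>> i) &&& 1) = if (na &&& nb).testBit i then 1 else 0 := by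
    have e1 : (na >>> i) &&& 1 = (na >>> i) % 2 := Nat.and_one_is_mod _
    have e2 : (nb >>> i) &&& 1 = (nb >>> i) % 2 := Nat.and_one_is_mod _
    have t1 : na.testBit i = decide ((na >>> i) % 2 = 1) :=
      (Nat.decide_shiftRight_mod_two_eq_one).symm
    have t2 : nb.testBit i = decide ((nb >>> i) % 2 = 1) :=
      (Nat.decide_shiftRight_mod_two_eq_one).symm
    have tand : (na &&& nb).testBit i = (na.testBit i && nb.testBit i) := Nat.testBit_and na nb i
    rw [e1, e2, tand, t1, t2]
    rcases Nat.mod_two_eq_zero_or_one (na >>> i) with h | h <;>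
      rcases Nat.mod_two_eq_zero_or_one (nb >>> i) with h' | h' <;>
        simp [h, h']
  rw [hbit, pvBitChar]
  by_cases h : (na &&& nb).testBit i <;> simp [h] <;> decide

-- main agreement on nonnegative inputs, stated for Nat casts
set_option maxHeartbeats 1000000 in
theorem pv_main (na nb : Nat) :
    binary_and_bitshift (na : Int) (nb : Int) = binary_and_bitshift_alt (na : Int) (nb : Int) := by
  have hneg : ¬ ((na : Int) < 0 ∨ (nb : Int) < 0) := by
    push_neg; exact ⟨Int.natCast_nonneg na, Int.natCast_nonneg nb⟩
  rw [binary_and_bitshift, binary_and_bitshift_alt, if_neg hneg, if_neg hneg]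
  dsimp only
  set w : Nat := max (max (PySem.Int.bitLength (na : Int)) (PySem.Int.bitLength (nb : Int))) 1 with hw
  have hw1 : 1 ≤ w := le_max_right _ _
  -- the AND result and its bound
  have hband : (PySem.Int.band (na : Int) (nb : Int)).toNat = na &&& nb := by
    rw [PySem.Int.band_natCast]; exact Int.toNat_natCast _
  have hrlt : na &&& nb < 2 ^ w := by
    calc na &&& nb ≤ na := Nat.and_le_left
    _ = ((na : Int)).natAbs := by simp
    _ < 2 ^ PySem.Int.bitLength (na : Int) := PySem.Int.lt_two_pow_bitLength _
    _ ≤ 2 ^ w := Nat.pow_le_pow_right (by norm_num) (le_trans (le_max_left _ _) (le_max_left _ _))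
  -- rewrite the loop into the descending map
  rw [pv_foldl_append]
  rw [PySem.List.pyRange_neg_one ((w : Int) - 1) (-1)]
  have hlen : (((w : Int) - 1) - (-1)).toNat = w := by omega
  rw [hlen, List.map_map]
  have hmap : (List.range w).map
      ((fun i : Int => PySem.Int.toStr
        (PySem.Int.band (PySem.Int.band ((na : Int) >>> (i.toNat : Int)) 1)
          (PySem.Int.band ((nb : Int) >>> (i.toNat : Int)) 1))) ∘ (fun k : Nat => (w : Int) - 1 - k)) =
      (List.range w).map (fun k => String.ofList [pvBitChar (na &&& nb) (w - 1 - k)]) := by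
    apply List.map_congr_left
    intro k hk
    have hk' : k < w := List.mem_range.mp hk
    have hnat : ((w : Int) - 1 - (k : Int)).toNat = w - 1 - k := by omega
    simp only [Function.comp]
    rw [hnat, pv_step na nb (w - 1 - k)]
  rw [hmap]
  -- join the singleton strings and compare character lists
  have hX : PySem.Str.join ""
      ((List.range w).map (fun k => String.ofList [pvBitChar (na &&& nb) (w - 1 - k)])) =
      String.ofList (pvFormatBin (na &&& nb) w) := by
    apply String.toList_inj.mp
    rw [PySem.Str.toList_join]
    have hmm : ((List.range w).map (fun k => String.ofList [pvBitChar (na &&& nb) (w - 1 - k)])).map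
        String.toList =
        ((List.range w).map (fun k => pvBitChar (na &&& nb) (w - 1 - k))).map (fun c => [c]) := by
      simp [List.map_map, Function.comp_def, String.toList_ofList]
    rw [hmm, show ("" : String).toList = ([] : List Char) from rfl,
        PySem.Chars.join_nil_singletons, String.toList_ofList]
    exact pv_core' w (na &&& nb) hw1 hrlt
  rw [List.nil_append]
  rw [hX, hband]

-- ===== VERDICT (by name: the statement is the Claim_ definition above) =====
theorem binary_and_bitshift_spec : Claim_equal_binary_and_bitshift := by
  intro a b _ hpre
  obtain ⟨ha, hb⟩ := hpre
  unfold Spec_binary_and_bitshift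
  obtain ⟨na, rfl⟩ := Int.eq_ofNat_of_zero_le ha
  obtain ⟨nb, rfl⟩ := Int.eq_ofNat_of_zero_le hb
  exact pv_main na nb
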